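-- pv_equiv track=rewrite | github.com/elliot-drew-zappi/AIPython | agents/chat_agent.py | parse_markdown_chunks
-- ===== SOURCE A (Python) =====
-- def parse_markdown_chunks(markdown_text):
--     chunks = []
--     lines = markdown_text.split("\n")
--     in_table = False
--     current_chunk = []
--
--     for line in lines:
--         if line.startswith("|") and not in_table:
--             if current_chunk:
--                 chunks.append("\n".join(current_chunk))
--                 current_chunk = []
--             in_table = True
--         elif not line.startswith("|") and in_table:
--             chunks.append("\n".join(current_chunk))
--             current_chunk = []
--             in_table = False
--
--         current_chunk.append(line)
--
--     if current_chunk: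
--         chunks.append("\n".join(current_chunk))
--
--     return chunks
-- ===== SOURCE B (Python) =====
-- def parse_markdown_chunks(markdown_text):
--     lines = markdown_text.split("\n")
--     chunks = []
--     n = len(lines)
--     i = 0
--     while i < n:
--         key = lines[i].startswith("|")
--         j = i + 1
--         while j < n and lines[j].startswith("|") == key:
--             j += 1
--         chunks.append("\n".join(lines[i:j]))
--         i = j
--     return chunks
-- ===== Notes on version B (the rewrite author's own statement) =====
-- stated objective: alternative
-- what changed: Replaced the stateful in_table flag with its flush branches and trailing flush by a two-pointer scan that finds each maximal run of same-key lines and joins it directly.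
import Mathlib
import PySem

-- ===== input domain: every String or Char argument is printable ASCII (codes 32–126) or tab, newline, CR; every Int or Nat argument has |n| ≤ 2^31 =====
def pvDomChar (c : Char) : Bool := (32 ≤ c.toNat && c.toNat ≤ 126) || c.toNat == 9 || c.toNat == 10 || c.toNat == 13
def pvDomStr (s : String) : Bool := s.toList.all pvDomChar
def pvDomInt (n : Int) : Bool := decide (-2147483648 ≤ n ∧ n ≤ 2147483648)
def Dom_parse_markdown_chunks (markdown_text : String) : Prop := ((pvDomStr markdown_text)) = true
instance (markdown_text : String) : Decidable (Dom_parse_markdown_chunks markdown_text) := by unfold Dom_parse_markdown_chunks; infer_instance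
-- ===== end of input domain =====

-- B replaces A's stateful in_table flag and flush branches by a maximal-run scan (same O(n) cost, plainer control flow).


-- ===== PORT A =====
-- "\n".join(current_chunk) (lines kept as List Char; exact via PySem.Chars.join)
def pvJoin (cur : List (List Char)) : String := String.ofList (PySem.Chars.join ['\n'] cur)

-- one iteration of A's for-loop over (chunks, in_table, current_chunk)
def pvStepA (st : List String × Bool × List (List Char)) (line : List Char) :
    List String × Bool × List (List Char) :=
  let chunks := st.1
  let in_table := st.2.1
  let cur := st.2.2
  let s :=
    if PySem.Chars.startswith line ['|'] && !in_table then
      (if cur.isEmpty then chunks else chunks ++ [pvJoin cur], true,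
       if cur.isEmpty then cur else ([] : List (List Char)))
    else if !(PySem.Chars.startswith line ['|']) && in_table then
      (chunks ++ [pvJoin cur], false, ([] : List (List Char)))
    else (chunks, in_table, cur)
  (s.1, s.2.1, s.2.2 ++ [line])

-- the trailing 'if current_chunk: chunks.append(...)' flush
def pvFinA (r : List String × Bool × List (List Char)) : List String :=
  if r.2.2.isEmpty then r.1 else r.1 ++ [pvJoin r.2.2]

def parse_markdown_chunks (markdown_text : String) : List String :=
  pvFinA ((PySem.Chars.splitOn markdown_text.toList ['\n']).foldl pvStepA ([], false, []))

-- ===== PORT B =====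
-- B's outer while loop over the remaining suffix lines[i:]; the inner while loop that moves j
-- past the same-key lines is the takeWhile/dropWhile split of the tail.
def pvRunsB : List (List Char) → List String
  | [] => []
  | l :: ls =>
      let key := PySem.Chars.startswith l ['|']
      pvJoin (l :: ls.takeWhile (fun x => PySem.Chars.startswith x ['|'] == key))
        :: pvRunsB (ls.dropWhile (fun x => PySem.Chars.startswith x ['|'] == key))
  termination_by lines => lines.length
  decreasing_by
    simpa using Nat.lt_succ_of_le (List.length_dropWhile_le _ _)

def parse_markdown_chunks_alt (markdown_text : String) : List String :=
  pvRunsB (PySem.Chars.splitOn markdown_text.toList ['\n'])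

-- ===== PRECONDITION & SPEC =====
def Spec_parse_markdown_chunks (markdown_text : String) (out : List String) : Prop := out = parse_markdown_chunks_alt markdown_text
instance (markdown_text : String) (out : List String) : Decidable (Spec_parse_markdown_chunks markdown_text out) := by unfold Spec_parse_markdown_chunks; infer_instance

-- ===== CLAIM (what is proved, stated in full; the proofs are below) =====
def Claim_equal_parse_markdown_chunks : Prop := ∀ (markdown_text : String), Dom_parse_markdown_chunks markdown_text → Spec_parse_markdown_chunks markdown_text (parse_markdown_chunks markdown_text)

-- ===== LEMMAS AND PROOFS =====

-- B's value when a run with key `key` has already accumulated `cur` and `lines` remain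
def pvCont (key : Bool) (cur lines : List (List Char)) : List String :=
  pvJoin (cur ++ lines.takeWhile (fun x => PySem.Chars.startswith x ['|'] == key))
    :: pvRunsB (lines.dropWhile (fun x => PySem.Chars.startswith x ['|'] == key))

theorem pvRunsB_cons (l : List Char) (ls : List (List Char)) :
    pvRunsB (l :: ls) = pvCont (PySem.Chars.startswith l ['|']) [l] ls := by
  rw [pvRunsB, pvCont]
  simp

theorem pvLoop (lines : List (List Char)) : ∀ (chunks : List String) (key : Bool)
    (cur : List (List Char)), cur ≠ [] →
    pvFinA (lines.foldl pvStepA (chunks, key, cur)) = chunks ++ pvCont key cur lines := by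
  induction lines with
  | nil =>
      intro chunks key cur hcur
      simp [pvFinA, pvCont, pvRunsB, hcur]
  | cons line rest ih =>
      intro chunks key cur hcur
      by_cases h : PySem.Chars.startswith line ['|'] = key
      · -- same key: line is appended to the current run
        have hstep : pvStepA (chunks, key, cur) line = (chunks, key, cur ++ [line]) := by
          cases key <;> simp_all [pvStepA]
        rw [List.foldl_cons, hstep, ih chunks key (cur ++ [line]) (by simp)]
        simp [pvCont, h, List.append_assoc]
      · -- key flips: flush cur, start a new run with line
        have hsw : PySem.Chars.startswith line ['|'] = !key := by
          cases key <;> cases hsw' : PySem.Chars.startswith line ['|'] <;> simp_all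
        have hstep : pvStepA (chunks, key, cur) line
            = (chunks ++ [pvJoin cur], !key, [line]) := by
          cases key <;> simp_all [pvStepA]
        rw [List.foldl_cons, hstep, ih (chunks ++ [pvJoin cur]) (!key) [line] (by simp)]
        have hne : (PySem.Chars.startswith line ['|'] == key) = false := by
          cases key <;> simp_all
        simp [pvCont, pvRunsB_cons, hsw, List.append_assoc]

-- ===== VERDICT (by name: the statement is the Claim_ definition above) =====
theorem parse_markdown_chunks_spec : Claim_equal_parse_markdown_chunks := by
  intro t _
  unfold Spec_parse_markdown_chunks parse_markdown_chunks parse_markdown_chunks_alt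
  cases hls : PySem.Chars.splitOn t.toList ['\n'] with
  | nil => simp [pvRunsB, pvFinA]
  | cons l ls =>
      have hstep : pvStepA ([], false, []) l = ([], PySem.Chars.startswith l ['|'], [l]) := by
        cases h : PySem.Chars.startswith l ['|'] <;> simp [pvStepA, h]
      rw [List.foldl_cons, hstep, pvLoop ls [] (PySem.Chars.startswith l ['|']) [l] (by simp),
        pvRunsB_cons]
      simp
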